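-- pv_equiv track=rewrite | github.com/git112/SGP--5 | backend/companies_sheets_service.py | _generate_company_icon
-- ===== SOURCE A (Python) =====
-- def _generate_company_icon(company_name: str) -> str:
--     """Generate emoji icon based on company name."""
--     name_lower = company_name.lower()
--
--     # Tech companies
--     if any(tech in name_lower for tech in ['google', 'microsoft', 'apple', 'meta', 'amazon', 'netflix']):
--         return "💻"
--     elif 'google' in name_lower:
--         return "🔍"
--     elif 'microsoft' in name_lower:
--         return "🪟"
--     elif 'apple' in name_lower:
--         return "🍎"
--     elif 'amazon' in name_lower:
--         return "📦"
--     elif 'netflix' in name_lower: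
--         return "🎬"
--     elif 'meta' in name_lower or 'facebook' in name_lower:
--         return "📱"
--
--     # Other companies
--     elif any(word in name_lower for word in ['bank', 'finance', 'insurance']):
--         return "💰"
--     elif any(word in name_lower for word in ['health', 'medical', 'pharma']):
--         return "🏥"
--     elif any(word in name_lower for word in ['auto', 'car', 'vehicle']):
--         return "🚗"
--     elif any(word in name_lower for word in ['food', 'restaurant', 'cafe']):
--         return "🍕"
--     else:
--         return "🏢"  # Default company icon
-- ===== SOURCE B (Python) =====
-- _KEYWORD_PRIORITY = {
--     'google': 0, 'microsoft': 0, 'apple': 0, 'meta': 0, 'amazon': 0, 'netflix': 0,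
--     'facebook': 1,
--     'bank': 2, 'finance': 2, 'insurance': 2,
--     'health': 3, 'medical': 3, 'pharma': 3,
--     'auto': 4, 'car': 4, 'vehicle': 4,
--     'food': 5, 'restaurant': 5, 'cafe': 5,
-- }
-- _PRIORITY_ICON = ["\U0001F4BB", "\U0001F4F1", "\U0001F4B0", "\U0001F3E5", "\U0001F697", "\U0001F355"]
--
--
-- def _generate_company_icon(company_name: str) -> str:
--     """Generate emoji icon based on company name."""
--     name = company_name.lower()
--     best = None
--     for i in range(len(name)):
--         for kw, pri in _KEYWORD_PRIORITY.items():
--             if name.startswith(kw, i) and (best is None or pri < best):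
--                 best = pri
--     return _PRIORITY_ICON[best] if best is not None else "\U0001F3E2"
-- ===== Notes on version B (the rewrite author's own statement) =====
-- stated objective: alternative
-- what changed: Instead of A's ordered chain of whole-string substring-membership tests, B scans the lowercased name once over all start positions, matches each keyword at each offset via startswith, keeps the minimum-priority match in a best-match accumulator, and maps that priority to an icon at the end.
import Mathlib
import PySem

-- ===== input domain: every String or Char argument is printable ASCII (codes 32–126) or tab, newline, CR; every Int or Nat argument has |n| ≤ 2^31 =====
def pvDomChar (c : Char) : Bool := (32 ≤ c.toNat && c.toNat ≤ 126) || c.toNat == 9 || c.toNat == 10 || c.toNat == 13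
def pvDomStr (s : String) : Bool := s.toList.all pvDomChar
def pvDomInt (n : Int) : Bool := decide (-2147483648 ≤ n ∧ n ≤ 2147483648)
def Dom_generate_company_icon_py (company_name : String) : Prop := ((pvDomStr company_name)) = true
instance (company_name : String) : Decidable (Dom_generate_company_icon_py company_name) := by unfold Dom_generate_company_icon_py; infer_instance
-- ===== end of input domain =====

-- B replaces A's ordered if/elif substring chain by a positional scan: it walks the lowercased
-- name once over all start positions, matches keywords at each offset, keeps the minimum-priority
-- match in an accumulator, and maps the priority to an icon at the end (objective: alternative).


-- ===== PORT A =====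
def generate_company_icon_py (company_name : String) : String :=
  let name_lower := PySem.Str.lower company_name
  if ["google", "microsoft", "apple", "meta", "amazon", "netflix"].any
      (fun tech => PySem.Str.isIn tech name_lower) then "💻"
  else if PySem.Str.isIn "google" name_lower then "🔍"
  else if PySem.Str.isIn "microsoft" name_lower then "🪟"
  else if PySem.Str.isIn "apple" name_lower then "🍎"
  else if PySem.Str.isIn "amazon" name_lower then "📦"
  else if PySem.Str.isIn "netflix" name_lower then "🎬"
  else if PySem.Str.isIn "meta" name_lower || PySem.Str.isIn "facebook" name_lower then "📱"
  else if ["bank", "finance", "insurance"].any (fun w => PySem.Str.isIn w name_lower) then "💰"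
  else if ["health", "medical", "pharma"].any (fun w => PySem.Str.isIn w name_lower) then "🏥"
  else if ["auto", "car", "vehicle"].any (fun w => PySem.Str.isIn w name_lower) then "🚗"
  else if ["food", "restaurant", "cafe"].any (fun w => PySem.Str.isIn w name_lower) then "🍕"
  else "🏢"

-- ===== PORT B =====
-- _KEYWORD_PRIORITY as an association list in insertion order
def pvKwPri : List (String × Nat) :=
  [("google", 0), ("microsoft", 0), ("apple", 0), ("meta", 0), ("amazon", 0), ("netflix", 0),
   ("facebook", 1),
   ("bank", 2), ("finance", 2), ("insurance", 2),
   ("health", 3), ("medical", 3), ("pharma", 3),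
   ("auto", 4), ("car", 4), ("vehicle", 4),
   ("food", 5), ("restaurant", 5), ("cafe", 5)]

def pvPriIcon : List String := ["💻", "📱", "💰", "🏥", "🚗", "🍕"]

-- Python's name.startswith(kw, i) with 0 ≤ i ≤ len(name) is: kw is a prefix of name[i:] (exact here).
def generate_company_icon_py_alt (company_name : String) : String :=
  let name := (PySem.Str.lower company_name).toList
  let best : Option Nat :=
    (List.range name.length).foldl
      (fun b i =>
        pvKwPri.foldl
          (fun b e =>
            if PySem.Chars.startswith (name.drop i) e.1.toList &&
               (match b with | none => true | some q => decide (e.2 < q))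
            then some e.2 else b) b) none
  match best with
  | none => "🏢"
  | some p => (PySem.List.pyGet? pvPriIcon (p : Int)).getD ""  -- index always in range (p < 6)

-- ===== PRECONDITION & SPEC =====
def Spec_generate_company_icon_py (company_name : String) (out : String) : Prop := out = generate_company_icon_py_alt company_name
instance (company_name : String) (out : String) : Decidable (Spec_generate_company_icon_py company_name out) := by unfold Spec_generate_company_icon_py; infer_instance

-- ===== CLAIM (what is proved, stated in full; the proofs are below) =====
def Claim_equal_generate_company_icon_py : Prop := ∀ (company_name : String), Dom_generate_company_icon_py company_name → Spec_generate_company_icon_py company_name (generate_company_icon_py company_name)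

-- ===== LEMMAS AND PROOFS =====
-- merge a new priority into the best-so-far (min)
def ominStep (b : Option Nat) (p : Nat) : Option Nat :=
  some (match b with | none => p | some q => min q p)

-- B's loop body is an omin-merge guarded by the (accumulator-independent) match test
theorem step_eq_omin (cs : List Char) (i : Nat) (b : Option Nat) (e : String × Nat) :
    (if PySem.Chars.startswith (cs.drop i) e.1.toList &&
        (match b with | none => true | some q => decide (e.2 < q))
     then some e.2 else b) =
    (if PySem.Chars.startswith (cs.drop i) e.1.toList then ominStep b e.2 else b) := by
  cases b with
  | none => simp [ominStep]
  | some q =>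
    by_cases h : PySem.Chars.startswith (cs.drop i) e.1.toList = true
    · simp [h, ominStep]
      split_ifs with h2 <;> (congr 1; omega)
    · simp [Bool.not_eq_true] at h
      simp [h]

-- the multiset of priorities of all (position, keyword) matches
def pvP (cs : List Char) : List Nat :=
  (List.range cs.length).flatMap
    (fun i => (pvKwPri.filter (fun e => PySem.Chars.startswith (cs.drop i) e.1.toList)).map (·.2))

theorem best_eq_foldl_pvP (cs : List Char) :
    (List.range cs.length).foldl
      (fun b i =>
        pvKwPri.foldl
          (fun b e =>
            if PySem.Chars.startswith (cs.drop i) e.1.toList &&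
               (match b with | none => true | some q => decide (e.2 < q))
            then some e.2 else b) b) none =
    (pvP cs).foldl ominStep none := by
  unfold pvP
  rw [List.foldl_flatMap]
  refine PySem.List.foldl_congr_mem _ _ _ _ ?_
  intro b i _
  rw [List.foldl_map,
    PySem.List.foldl_congr_mem pvKwPri _
      (fun b e => if PySem.Chars.startswith (cs.drop i) e.1.toList then ominStep b e.2 else b) b
      (fun b e _ => step_eq_omin cs i b e),
    PySem.List.foldl_if_eq_foldl_filter]

theorem foldl_omin_some (P : List Nat) (q : Nat) :
    P.foldl ominStep (some q) = some (P.foldl min q) := by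
  induction P generalizing q with
  | nil => rfl
  | cons p rest ih => simp [List.foldl, ominStep, ih]

-- a keyword is a prefix at some position below the length iff it is a substring
theorem exists_lt_prefix_iff (sub cs : List Char) (h : sub ≠ []) :
    (∃ i, i < cs.length ∧ sub <+: cs.drop i) ↔ PySem.Chars.isIn sub cs = true := by
  rw [← PySem.Chars.exists_prefix_drop_iff_isIn]
  constructor
  · rintro ⟨i, _, hp⟩; exact ⟨i, hp⟩
  · rintro ⟨j, hp⟩
    by_cases hj : j < cs.length
    · exact ⟨j, hj, hp⟩
    · exfalso
      rw [List.drop_eq_nil_of_le (by omega)] at hp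
      exact h (List.prefix_nil.mp hp)

theorem mem_pvP_iff (cs : List Char) (p : Nat) :
    p ∈ pvP cs ↔ ∃ kw, (kw, p) ∈ pvKwPri ∧ PySem.Chars.isIn kw.toList cs = true := by
  unfold pvP
  simp only [List.mem_flatMap, List.mem_range, List.mem_map, List.mem_filter]
  constructor
  · rintro ⟨i, hi, e, ⟨hmem, hsw⟩, hp⟩
    refine ⟨e.1, ?_, ?_⟩
    · cases e; cases hp; exact hmem
    · exact (exists_lt_prefix_iff e.1.toList cs
        (by revert hmem; cases e; simp [pvKwPri]; rintro (⟨h,_⟩|⟨h,_⟩|⟨h,_⟩|⟨h,_⟩|⟨h,_⟩|⟨h,_⟩|⟨h,_⟩|⟨h,_⟩|⟨h,_⟩|⟨h,_⟩|⟨h,_⟩|⟨h,_⟩|⟨h,_⟩|⟨h,_⟩|⟨h,_⟩|⟨h,_⟩|⟨h,_⟩|⟨h,_⟩|⟨h,_⟩) <;> simp [h])).mp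
        ⟨i, hi, (PySem.Chars.startswith_iff _ _).mp hsw⟩
  · rintro ⟨kw, hmem, hin⟩
    have hne : kw.toList ≠ [] := by
      revert hmem; simp [pvKwPri]
      rintro (⟨h,_⟩|⟨h,_⟩|⟨h,_⟩|⟨h,_⟩|⟨h,_⟩|⟨h,_⟩|⟨h,_⟩|⟨h,_⟩|⟨h,_⟩|⟨h,_⟩|⟨h,_⟩|⟨h,_⟩|⟨h,_⟩|⟨h,_⟩|⟨h,_⟩|⟨h,_⟩|⟨h,_⟩|⟨h,_⟩|⟨h,_⟩) <;> simp [h]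
    obtain ⟨i, hi, hp⟩ := (exists_lt_prefix_iff kw.toList cs hne).mpr hin
    exact ⟨i, hi, (kw, p), ⟨hmem, (PySem.Chars.startswith_iff _ _).mpr hp⟩, rfl⟩

theorem pvP_lt6 (cs : List Char) (p : Nat) (h : p ∈ pvP cs) : p < 6 := by
  obtain ⟨kw, hmem, -⟩ := (mem_pvP_iff cs p).mp h
  revert hmem; simp [pvKwPri]
  rintro (⟨_,h⟩|⟨_,h⟩|⟨_,h⟩|⟨_,h⟩|⟨_,h⟩|⟨_,h⟩|⟨_,h⟩|⟨_,h⟩|⟨_,h⟩|⟨_,h⟩|⟨_,h⟩|⟨_,h⟩|⟨_,h⟩|⟨_,h⟩|⟨_,h⟩|⟨_,h⟩|⟨_,h⟩|⟨_,h⟩|⟨_,h⟩) <;> omega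

-- ===== VERDICT (by name: the statement is the Claim_ definition above) =====
theorem generate_company_icon_py_spec : Claim_equal_generate_company_icon_py := by
  intro s _
  unfold Spec_generate_company_icon_py
  simp only [generate_company_icon_py, generate_company_icon_py_alt, PySem.Str.isIn_eq,
    PySem.Str.toList_lower, best_eq_foldl_pvP]
  set cs := PySem.Chars.lower s.toList with hcs
  cases hP : pvP cs with
  | nil =>
    have hfalse : ∀ (kw : String) (p : Nat), (kw, p) ∈ pvKwPri → PySem.Chars.isIn kw.toList cs = false := by
      intro kw p hm
      by_contra h
      rw [Bool.not_eq_false] at h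
      have : p ∈ pvP cs := (mem_pvP_iff cs p).mpr ⟨kw, hm, h⟩
      rw [hP] at this; exact absurd this (List.not_mem_nil)
    have hf0 := hfalse "google" 0 (by simp [pvKwPri])
    simp at hf0
    have hf1 := hfalse "microsoft" 0 (by simp [pvKwPri])
    simp at hf1
    have hf2 := hfalse "apple" 0 (by simp [pvKwPri])
    simp at hf2
    have hf3 := hfalse "meta" 0 (by simp [pvKwPri])
    simp at hf3
    have hf4 := hfalse "amazon" 0 (by simp [pvKwPri])
    simp at hf4
    have hf5 := hfalse "netflix" 0 (by simp [pvKwPri])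
    simp at hf5
    have hf6 := hfalse "facebook" 1 (by simp [pvKwPri])
    simp at hf6
    have hf7 := hfalse "bank" 2 (by simp [pvKwPri])
    simp at hf7
    have hf8 := hfalse "finance" 2 (by simp [pvKwPri])
    simp at hf8
    have hf9 := hfalse "insurance" 2 (by simp [pvKwPri])
    simp at hf9
    have hf10 := hfalse "health" 3 (by simp [pvKwPri])
    simp at hf10
    have hf11 := hfalse "medical" 3 (by simp [pvKwPri])
    simp at hf11
    have hf12 := hfalse "pharma" 3 (by simp [pvKwPri])
    simp at hf12
    have hf13 := hfalse "auto" 4 (by simp [pvKwPri])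
    simp at hf13
    have hf14 := hfalse "car" 4 (by simp [pvKwPri])
    simp at hf14
    have hf15 := hfalse "vehicle" 4 (by simp [pvKwPri])
    simp at hf15
    have hf16 := hfalse "food" 5 (by simp [pvKwPri])
    simp at hf16
    have hf17 := hfalse "restaurant" 5 (by simp [pvKwPri])
    simp at hf17
    have hf18 := hfalse "cafe" 5 (by simp [pvKwPri])
    simp at hf18
    simp [hf0, hf1, hf2, hf3, hf4, hf5, hf6, hf7, hf8, hf9, hf10, hf11, hf12, hf13, hf14, hf15, hf16, hf17, hf18]
  | cons p rest =>
    have hstep : List.foldl ominStep none (p :: rest) = some (rest.foldl min p) := by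
      rw [List.foldl_cons]; exact foldl_omin_some rest p
    rw [hstep]
    set m := rest.foldl min p with hm
    have hmem : m ∈ pvP cs := by
      rw [hP]
      rcases PySem.List.foldl_min_mem rest p with h | h
      · rw [hm, h]; exact List.mem_cons_self
      · exact List.mem_cons_of_mem p h
    have hle : ∀ y ∈ pvP cs, m ≤ y := by
      rw [hP]
      intro y hy
      rcases List.mem_cons.mp hy with rfl | hy'
      · exact (PySem.List.foldl_min_le rest y).1
      · exact (PySem.List.foldl_min_le rest p).2 y hy'
    have hm6 : m < 6 := pvP_lt6 cs m hmem
    obtain ⟨kw, hkw, hin⟩ := (mem_pvP_iff cs m).mp hmem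
    have hlow : ∀ q kw', q < m → (kw', q) ∈ pvKwPri → PySem.Chars.isIn kw'.toList cs = false := by
      intro q kw' hq hm'
      by_contra h
      rw [Bool.not_eq_false] at h
      have : q ∈ pvP cs := (mem_pvP_iff cs q).mpr ⟨kw', hm', h⟩
      exact absurd (hle q this) (by omega)
    interval_cases m
    · -- m = 0
      simp [pvKwPri] at hkw

      rcases hkw with rfl|rfl|rfl|rfl|rfl|rfl <;>
      · simp at hin
        simp [hin, pvPriIcon, PySem.List.pyGet?, PySem.List.pyIdx?]
    · -- m = 1
      simp [pvKwPri] at hkw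
      have hl0 := hlow 0 "google" (by omega) (by simp [pvKwPri])
      simp at hl0
      have hl1 := hlow 0 "microsoft" (by omega) (by simp [pvKwPri])
      simp at hl1
      have hl2 := hlow 0 "apple" (by omega) (by simp [pvKwPri])
      simp at hl2
      have hl3 := hlow 0 "meta" (by omega) (by simp [pvKwPri])
      simp at hl3
      have hl4 := hlow 0 "amazon" (by omega) (by simp [pvKwPri])
      simp at hl4
      have hl5 := hlow 0 "netflix" (by omega) (by simp [pvKwPri])
      simp at hl5
      rcases hkw with rfl
      simp at hin
      simp [hin, hl0, hl1, hl2, hl3, hl4, hl5, pvPriIcon, PySem.List.pyGet?, PySem.List.pyIdx?]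
    · -- m = 2
      simp [pvKwPri] at hkw
      have hl0 := hlow 0 "google" (by omega) (by simp [pvKwPri])
      simp at hl0
      have hl1 := hlow 0 "microsoft" (by omega) (by simp [pvKwPri])
      simp at hl1
      have hl2 := hlow 0 "apple" (by omega) (by simp [pvKwPri])
      simp at hl2
      have hl3 := hlow 0 "meta" (by omega) (by simp [pvKwPri])
      simp at hl3
      have hl4 := hlow 0 "amazon" (by omega) (by simp [pvKwPri])
      simp at hl4
      have hl5 := hlow 0 "netflix" (by omega) (by simp [pvKwPri])
      simp at hl5
      have hl6 := hlow 1 "facebook" (by omega) (by simp [pvKwPri])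
      simp at hl6
      rcases hkw with rfl|rfl|rfl <;>
      · simp at hin
        simp [hin, hl0, hl1, hl2, hl3, hl4, hl5, hl6, pvPriIcon, PySem.List.pyGet?, PySem.List.pyIdx?]
    · -- m = 3
      simp [pvKwPri] at hkw
      have hl0 := hlow 0 "google" (by omega) (by simp [pvKwPri])
      simp at hl0
      have hl1 := hlow 0 "microsoft" (by omega) (by simp [pvKwPri])
      simp at hl1
      have hl2 := hlow 0 "apple" (by omega) (by simp [pvKwPri])
      simp at hl2
      have hl3 := hlow 0 "meta" (by omega) (by simp [pvKwPri])
      simp at hl3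
      have hl4 := hlow 0 "amazon" (by omega) (by simp [pvKwPri])
      simp at hl4
      have hl5 := hlow 0 "netflix" (by omega) (by simp [pvKwPri])
      simp at hl5
      have hl6 := hlow 1 "facebook" (by omega) (by simp [pvKwPri])
      simp at hl6
      have hl7 := hlow 2 "bank" (by omega) (by simp [pvKwPri])
      simp at hl7
      have hl8 := hlow 2 "finance" (by omega) (by simp [pvKwPri])
      simp at hl8
      have hl9 := hlow 2 "insurance" (by omega) (by simp [pvKwPri])
      simp at hl9
      rcases hkw with rfl|rfl|rfl <;>
      · simp at hin
        simp [hin, hl0, hl1, hl2, hl3, hl4, hl5, hl6, hl7, hl8, hl9, pvPriIcon, PySem.List.pyGet?, PySem.List.pyIdx?]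
    · -- m = 4
      simp [pvKwPri] at hkw
      have hl0 := hlow 0 "google" (by omega) (by simp [pvKwPri])
      simp at hl0
      have hl1 := hlow 0 "microsoft" (by omega) (by simp [pvKwPri])
      simp at hl1
      have hl2 := hlow 0 "apple" (by omega) (by simp [pvKwPri])
      simp at hl2
      have hl3 := hlow 0 "meta" (by omega) (by simp [pvKwPri])
      simp at hl3
      have hl4 := hlow 0 "amazon" (by omega) (by simp [pvKwPri])
      simp at hl4
      have hl5 := hlow 0 "netflix" (by omega) (by simp [pvKwPri])
      simp at hl5
      have hl6 := hlow 1 "facebook" (by omega) (by simp [pvKwPri])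
      simp at hl6
      have hl7 := hlow 2 "bank" (by omega) (by simp [pvKwPri])
      simp at hl7
      have hl8 := hlow 2 "finance" (by omega) (by simp [pvKwPri])
      simp at hl8
      have hl9 := hlow 2 "insurance" (by omega) (by simp [pvKwPri])
      simp at hl9
      have hl10 := hlow 3 "health" (by omega) (by simp [pvKwPri])
      simp at hl10
      have hl11 := hlow 3 "medical" (by omega) (by simp [pvKwPri])
      simp at hl11
      have hl12 := hlow 3 "pharma" (by omega) (by simp [pvKwPri])
      simp at hl12
      rcases hkw with rfl|rfl|rfl <;>
      · simp at hin
        simp [hin, hl0, hl1, hl2, hl3, hl4, hl5, hl6, hl7, hl8, hl9, hl10, hl11, hl12, pvPriIcon, PySem.List.pyGet?, PySem.List.pyIdx?]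
    · -- m = 5
      simp [pvKwPri] at hkw
      have hl0 := hlow 0 "google" (by omega) (by simp [pvKwPri])
      simp at hl0
      have hl1 := hlow 0 "microsoft" (by omega) (by simp [pvKwPri])
      simp at hl1
      have hl2 := hlow 0 "apple" (by omega) (by simp [pvKwPri])
      simp at hl2
      have hl3 := hlow 0 "meta" (by omega) (by simp [pvKwPri])
      simp at hl3
      have hl4 := hlow 0 "amazon" (by omega) (by simp [pvKwPri])
      simp at hl4
      have hl5 := hlow 0 "netflix" (by omega) (by simp [pvKwPri])
      simp at hl5
      have hl6 := hlow 1 "facebook" (by omega) (by simp [pvKwPri])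
      simp at hl6
      have hl7 := hlow 2 "bank" (by omega) (by simp [pvKwPri])
      simp at hl7
      have hl8 := hlow 2 "finance" (by omega) (by simp [pvKwPri])
      simp at hl8
      have hl9 := hlow 2 "insurance" (by omega) (by simp [pvKwPri])
      simp at hl9
      have hl10 := hlow 3 "health" (by omega) (by simp [pvKwPri])
      simp at hl10
      have hl11 := hlow 3 "medical" (by omega) (by simp [pvKwPri])
      simp at hl11
      have hl12 := hlow 3 "pharma" (by omega) (by simp [pvKwPri])
      simp at hl12
      have hl13 := hlow 4 "auto" (by omega) (by simp [pvKwPri])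
      simp at hl13
      have hl14 := hlow 4 "car" (by omega) (by simp [pvKwPri])
      simp at hl14
      have hl15 := hlow 4 "vehicle" (by omega) (by simp [pvKwPri])
      simp at hl15
      rcases hkw with rfl|rfl|rfl <;>
      · simp at hin
        simp [hin, hl0, hl1, hl2, hl3, hl4, hl5, hl6, hl7, hl8, hl9, hl10, hl11, hl12, hl13, hl14, hl15, pvPriIcon, PySem.List.pyGet?, PySem.List.pyIdx?]
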